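-- pv_equiv track=rewrite | github.com/matthewjpicone/bear_map | logic/scoring.py | get_walkable_tiles
-- ===== SOURCE A (Python) =====
-- from typing import List, Dict, Tuple, Optional
--
-- def get_walkable_tiles(grid_size: int, banners: List[Dict], bear_traps: List[Dict]) -> List[Tuple[int, int]]:
--     """Get all walkable tiles, excluding banners and bear influence areas."""
--     walkable: List[Tuple[int, int]] = []
--     occupied = set()
--
--     # Add banners
--     for b in banners:
--         bx, by = b.get("x"), b.get("y")
--         if bx is not None and by is not None:
--             occupied.add((bx, by))
--
--     # Add bear influence (3x3 around each bear)
--     for bear in bear_traps: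
--         bx, by = bear.get("x"), bear.get("y")
--         if bx is None or by is None:
--             continue
--         for dx in (-1, 0, 1):
--             for dy in (-1, 0, 1):
--                 occupied.add((bx + dx, by + dy))
--
--     for x in range(grid_size):
--         for y in range(grid_size):
--             if (x, y) not in occupied:
--                 walkable.append((x, y))
--
--     return walkable
-- ===== SOURCE B (Python) =====
-- from typing import List, Dict, Tuple
--
--
-- def get_walkable_tiles(grid_size: int, banners: List[Dict], bear_traps: List[Dict]) -> List[Tuple[int, int]]:
--     """Get all walkable tiles, excluding banners and bear influence areas.
--
--     Linearizes in-range blocked tiles to row-major indices x*n+y, sorts them,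
--     and emits the walkable tiles as the gaps between consecutive blocked indices
--     (no per-tile membership test over the grid)."""
--     n = grid_size
--     if n <= 0:
--         return []
--     blocked = set()
--     for b in banners:
--         bx, by = b.get("x"), b.get("y")
--         if bx is not None and by is not None and 0 <= bx < n and 0 <= by < n:
--             blocked.add(bx * n + by)
--     for bear in bear_traps:
--         bx, by = bear.get("x"), bear.get("y")
--         if bx is None or by is None:
--             continue
--         for dx in (-1, 0, 1):
--             for dy in (-1, 0, 1):
--                 x, y = bx + dx, by + dy
--                 if 0 <= x < n and 0 <= y < n:
--                     blocked.add(x * n + y)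
--     walkable: List[Tuple[int, int]] = []
--     prev = -1
--     for i in sorted(blocked):
--         walkable.extend((k // n, k % n) for k in range(prev + 1, i))
--         prev = i
--     walkable.extend((k // n, k % n) for k in range(prev + 1, n * n))
--     return walkable
-- ===== Notes on version B (the rewrite author's own statement) =====
-- stated objective: alternative
-- what changed: B replaces A's per-tile membership test over the whole grid by a gap-enumeration sweep: it linearizes the in-range blocked tiles to row-major indices x*n+y, sorts them, and emits walkable tiles as the index gaps between consecutive blocked indices (out-of-range banners/bear cells are dropped at construction instead of never matching).
import Mathlib
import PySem

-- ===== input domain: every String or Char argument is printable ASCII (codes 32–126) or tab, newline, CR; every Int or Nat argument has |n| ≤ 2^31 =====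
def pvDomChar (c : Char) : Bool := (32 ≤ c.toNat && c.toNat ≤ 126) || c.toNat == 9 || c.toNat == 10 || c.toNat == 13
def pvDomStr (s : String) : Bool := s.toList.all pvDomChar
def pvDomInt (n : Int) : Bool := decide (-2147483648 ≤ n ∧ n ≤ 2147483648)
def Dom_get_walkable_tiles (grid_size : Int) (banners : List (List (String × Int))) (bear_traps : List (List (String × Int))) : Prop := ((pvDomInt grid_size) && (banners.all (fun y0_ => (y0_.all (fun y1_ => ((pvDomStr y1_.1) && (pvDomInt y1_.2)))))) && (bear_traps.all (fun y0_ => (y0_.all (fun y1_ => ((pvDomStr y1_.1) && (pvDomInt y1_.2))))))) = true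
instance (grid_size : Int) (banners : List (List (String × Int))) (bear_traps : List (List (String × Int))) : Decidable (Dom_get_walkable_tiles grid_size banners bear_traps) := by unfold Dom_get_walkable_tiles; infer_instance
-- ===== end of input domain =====

-- B replaces A's per-tile membership scan of the grid by a gap-enumeration sweep over the
-- sorted row-major indices of the in-range blocked tiles; objective: alternative (same cost).


-- ===== PORT A =====
-- Python semantics: d.get(k) on an association list (first match)
def pvGetA (d : List (String × Int)) (k : String) : Option Int :=
  (d.find? (fun p => p.1 == k)).map (·.2)

def get_walkable_tiles (grid_size : Int) (banners : List (List (String × Int))) (bear_traps : List (List (String × Int))) : List (Int × Int) :=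
  -- occupied = set(); banner loop
  let occupied : PySem.Set (Int × Int) :=
    banners.foldl (fun occupied b =>
      match pvGetA b "x", pvGetA b "y" with
      | some bx, some bby => PySem.Set.add occupied (bx, bby)
      | _, _ => occupied) PySem.Set.empty
  -- bear loop: 3x3 influence
  let occupied : PySem.Set (Int × Int) :=
    bear_traps.foldl (fun occupied bear =>
      match pvGetA bear "x", pvGetA bear "y" with
      | some bx, some bby =>
          ([-1, 0, 1] : List Int).foldl (fun occupied dx =>
            ([-1, 0, 1] : List Int).foldl (fun occupied dy =>
              PySem.Set.add occupied (bx + dx, bby + dy)) occupied) occupied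
      | _, _ => occupied) occupied
  -- grid scan, appending unoccupied tiles
  (PySem.List.pyRange 0 grid_size 1).foldl (fun walkable x =>
    (PySem.List.pyRange 0 grid_size 1).foldl (fun walkable y =>
      if !(PySem.Set.contains occupied (x, y)) then walkable ++ [(x, y)] else walkable)
      walkable) []

-- ===== PORT B =====
-- Python semantics: d.get(k) on an association list (first match)
def pvGetB (d : List (String × Int)) (k : String) : Option Int :=
  (d.find? (fun p => p.1 == k)).map (·.2)

def get_walkable_tiles_alt (grid_size : Int) (banners : List (List (String × Int))) (bear_traps : List (List (String × Int))) : List (Int × Int) :=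
  let n := grid_size
  if n ≤ 0 then [] else
  -- blocked = set() of row-major indices of in-range blocked tiles
  let blocked : PySem.Set Int :=
    banners.foldl (fun blocked b =>
      match pvGetB b "x" with
      | some bx =>
        match pvGetB b "y" with
        | some bby =>
            if 0 ≤ bx ∧ bx < n ∧ 0 ≤ bby ∧ bby < n then PySem.Set.add blocked (bx * n + bby)
            else blocked
        | none => blocked
      | none => blocked) PySem.Set.empty
  let blocked : PySem.Set Int :=
    bear_traps.foldl (fun blocked bear =>
      match pvGetB bear "x" with
      | some bx =>
        match pvGetB bear "y" with
        | some bby =>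
            ([-1, 0, 1] : List Int).foldl (fun blocked dx =>
              ([-1, 0, 1] : List Int).foldl (fun blocked dy =>
                let x := bx + dx
                let y := bby + dy
                if 0 ≤ x ∧ x < n ∧ 0 ≤ y ∧ y < n then PySem.Set.add blocked (x * n + y)
                else blocked) blocked) blocked
        | none => blocked
      | none => blocked) blocked
  -- gap sweep over sorted blocked indices
  let st := (PySem.List.sorted blocked (fun i => i) false).foldl
    (fun (st : List (Int × Int) × Int) i =>
      (st.1 ++ (PySem.List.pyRange (st.2 + 1) i 1).map
        (fun k => (PySem.Int.floordiv k n, PySem.Int.mod k n)), i))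
    ([], -1)
  st.1 ++ (PySem.List.pyRange (st.2 + 1) (n * n) 1).map
    (fun k => (PySem.Int.floordiv k n, PySem.Int.mod k n))

-- ===== PRECONDITION & SPEC =====
def Spec_get_walkable_tiles (grid_size : Int) (banners : List (List (String × Int))) (bear_traps : List (List (String × Int))) (out : List (Int × Int)) : Prop := out = get_walkable_tiles_alt grid_size banners bear_traps
instance (grid_size : Int) (banners : List (List (String × Int))) (bear_traps : List (List (String × Int))) (out : List (Int × Int)) : Decidable (Spec_get_walkable_tiles grid_size banners bear_traps out) := by unfold Spec_get_walkable_tiles; infer_instance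

-- ===== CLAIM (what is proved, stated in full; the proofs are below) =====
def Claim_equal_get_walkable_tiles : Prop := ∀ (grid_size : Int) (banners : List (List (String × Int))) (bear_traps : List (List (String × Int))), Dom_get_walkable_tiles grid_size banners bear_traps → Spec_get_walkable_tiles grid_size banners bear_traps (get_walkable_tiles grid_size banners bear_traps)

-- ===== LEMMAS AND PROOFS =====

-- the (x, y) pairs a loop over dicts extracts
def pvPairs (l : List (List (String × Int))) : List (Int × Int) :=
  l.filterMap (fun b =>
    (pvGetA b "x").bind (fun bx => (pvGetA b "y").map (fun bby => (bx, bby))))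

-- 3x3 neighborhoods of a list of centers
def pvZones (cs : List (Int × Int)) : List (Int × Int) :=
  cs.flatMap (fun c =>
    ([-1, 0, 1] : List Int).flatMap (fun dx =>
      ([-1, 0, 1] : List Int).map (fun dy => (c.1 + dx, c.2 + dy))))

-- generic membership shape of a set-building foldl
lemma pv_mem_foldl_step {α β : Type} [BEq β] [LawfulBEq β]
    (l : List α) (g : PySem.Set β → α → PySem.Set β) (C : α → β → Prop)
    (hg : ∀ s a k, k ∈ g s a ↔ k ∈ s ∨ C a k) :
    ∀ (s : PySem.Set β) (k : β), k ∈ l.foldl g s ↔ k ∈ s ∨ ∃ a ∈ l, C a k := by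
  induction l with
  | nil => simp
  | cons a l ih =>
    intro s k
    rw [List.foldl_cons, ih, hg]
    simp [or_assoc]

-- a foldl of guarded adds preserves Nodup
lemma pv_nodup_foldl {α β : Type} [BEq β] [LawfulBEq β]
    (l : List α) (g : PySem.Set β → α → PySem.Set β)
    (hg : ∀ s a, s.Nodup → (g s a).Nodup) :
    ∀ (s : PySem.Set β), s.Nodup → (l.foldl g s).Nodup := by
  induction l with
  | nil => intro s hs; exact hs
  | cons a l ih => intro s hs; exact ih _ (hg s a hs)

-- in-range condition of B's linearization
def pvInR (n : Int) (c : Int × Int) : Prop := 0 ≤ c.1 ∧ c.1 < n ∧ 0 ≤ c.2 ∧ c.2 < n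

lemma pv_mem_ite_add {β : Type} [BEq β] [LawfulBEq β] (c : Prop) [Decidable c]
    (s : PySem.Set β) (v k : β) :
    k ∈ (if c then PySem.Set.add s v else s) ↔ k ∈ s ∨ (c ∧ k = v) := by
  split_ifs with h <;> simp [PySem.Set.mem_add, h]

lemma pv_lin_inv (n x y : Int) (hn : 0 < n) (hy0 : 0 ≤ y) (hy1 : y < n) :
    PySem.Int.floordiv (x * n + y) n = x ∧ PySem.Int.mod (x * n + y) n = y := by
  have hd : PySem.Int.floordiv (x * n + y) n = x := by
    rw [PySem.Int.floordiv_eq_iff_of_pos hn]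
    constructor
    · omega
    · have : (x + 1) * n = x * n + n := by ring
      omega
  refine ⟨hd, ?_⟩
  have := PySem.Int.floordiv_mul_add_mod (x * n + y) n
  rw [hd] at this
  omega

lemma pv_lin_bounds (n x y : Int) (hn : 0 < n) (hx0 : 0 ≤ x) (hx1 : x < n) (hy0 : 0 ≤ y) (hy1 : y < n) :
    0 ≤ x * n + y ∧ x * n + y < n * n := by
  have h1 : 0 ≤ x * n := mul_nonneg hx0 (le_of_lt hn)
  have h2 : x * n ≤ (n - 1) * n := mul_le_mul_of_nonneg_right (by omega) (le_of_lt hn)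
  have h3 : (n - 1) * n = n * n - n := by ring
  omega

lemma pv_divmod_bounds (n k : Int) (hn : 0 < n) (hk0 : 0 ≤ k) (hk1 : k < n * n) :
    0 ≤ PySem.Int.floordiv k n ∧ PySem.Int.floordiv k n < n ∧
    0 ≤ PySem.Int.mod k n ∧ PySem.Int.mod k n < n := by
  refine ⟨?_, ?_, PySem.Int.mod_nonneg _ hn, PySem.Int.mod_lt _ hn⟩
  · rw [PySem.Int.le_floordiv_iff_mul_le hn]
    omega
  · rw [PySem.Int.floordiv_lt_iff_lt_mul hn]
    exact hk1

-- the row-major tile list is the div/mod image of the linear index range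
lemma pv_rowmajor (n : Int) (hn : 0 < n) : ∀ j : Nat,
    (PySem.List.pyRange 0 (j : Int) 1).flatMap (fun x =>
      (PySem.List.pyRange 0 n 1).map (fun y => (x, y)))
    = (PySem.List.pyRange 0 ((j : Int) * n) 1).map
        (fun k => (PySem.Int.floordiv k n, PySem.Int.mod k n)) := by
  intro j
  induction j with
  | zero => simp [PySem.List.pyRange_zero]
  | succ j ih =>
    rw [show ((j + 1 : Nat) : Int) = (j : Int) + 1 by push_cast; ring,
      PySem.List.pyRange_one_succ_right (by positivity),
      List.flatMap_append, ih,
      PySem.List.pyRange_one_append 0 ((j : Int) * n) (((j : Int) + 1) * n)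
        (by positivity) (by nlinarith),
      List.map_append]
    congr 1
    simp only [List.flatMap_cons, List.flatMap_nil, List.append_nil]
    rw [PySem.List.pyRange_one 0 n, PySem.List.pyRange_one ((j:Int)*n) (((j:Int)+1)*n)]
    have hlen : ((((j:Int) + 1) * n) - (j:Int) * n) = n ∧ (n - 0 : Int) = n := ⟨by ring, by ring⟩
    rw [hlen.1, hlen.2, List.map_map, List.map_map]
    refine List.map_congr_left (fun k hk => ?_)
    simp only [List.mem_range] at hk
    have hk' : (k : Int) < n := by
      have h2 : (k : Int) < (n.toNat : Int) := by exact_mod_cast hk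
      omega
    have h := pv_lin_inv n (j : Int) (k : Int) hn (by positivity) hk'
    simp only [Function.comp, h.1, h.2, zero_add]

-- the gap sweep over a sorted in-range blocked list is the filtered index range
lemma pv_gap (N : Int) (f : Int → Int × Int) : ∀ (bs : List Int) (acc : List (Int × Int)) (prev : Int),
    bs.Pairwise (· < ·) → (∀ i ∈ bs, prev < i ∧ i < N) →
    ((bs.foldl (fun st i => (st.1 ++ (PySem.List.pyRange (st.2 + 1) i 1).map f, i)) (acc, prev)).1
      ++ (PySem.List.pyRange
            ((bs.foldl (fun st i => (st.1 ++ (PySem.List.pyRange (st.2 + 1) i 1).map f, i)) (acc, prev)).2 + 1)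
            N 1).map f)
    = acc ++ ((PySem.List.pyRange (prev + 1) N 1).filter (fun k => !decide (k ∈ bs))).map f := by
  intro bs
  induction bs with
  | nil =>
    intro acc prev _ _
    simp [List.filter_eq_self.mpr]
  | cons i rest ih =>
    intro acc prev hs hb
    rw [List.pairwise_cons] at hs
    obtain ⟨hi_rest, hrest_sorted⟩ := hs
    have hpi : prev < i := (hb i (List.mem_cons_self ..)).1
    have hiN : i < N := (hb i (List.mem_cons_self ..)).2
    rw [List.foldl_cons]
    rw [ih (acc ++ (PySem.List.pyRange (prev + 1) i 1).map f) i hrest_sorted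
      (fun j hj => ⟨hi_rest j hj, (hb j (List.mem_cons_of_mem _ hj)).2⟩)]
    rw [PySem.List.pyRange_one_append (prev + 1) i N (by omega) (by omega),
      PySem.List.pyRange_one_append i (i + 1) N (by omega) (by omega),
      PySem.List.pyRange_one_singleton]
    rw [List.filter_append, List.filter_append]
    have h1 : (PySem.List.pyRange (prev + 1) i 1).filter (fun k => !decide (k ∈ i :: rest))
        = PySem.List.pyRange (prev + 1) i 1 := by
      refine List.filter_eq_self.mpr (fun k hk => ?_)
      rw [PySem.List.mem_pyRange_one] at hk
      have hne : k ≠ i := by omega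
      have hnr : k ∉ rest := fun hkr => by have := hi_rest k hkr; omega
      simp [hne, hnr]
    have h2 : ([i] : List Int).filter (fun k => !decide (k ∈ i :: rest)) = [] := by
      simp
    have h3 : (PySem.List.pyRange (i + 1) N 1).filter (fun k => !decide (k ∈ i :: rest))
        = (PySem.List.pyRange (i + 1) N 1).filter (fun k => !decide (k ∈ rest)) := by
      refine List.filter_congr (fun k hk => ?_)
      rw [PySem.List.mem_pyRange_one] at hk
      have : k ≠ i := by omega
      simp [this]
    rw [h1, h2, h3]
    simp [List.map_append]

-- membership in A's occupied set
lemma pv_mem_occA (banners bear_traps : List (List (String × Int))) (t : Int × Int) :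
    (t ∈ bear_traps.foldl (fun occupied bear =>
      match pvGetA bear "x", pvGetA bear "y" with
      | some bx, some bby =>
          ([-1, 0, 1] : List Int).foldl (fun occupied dx =>
            ([-1, 0, 1] : List Int).foldl (fun occupied dy =>
              PySem.Set.add occupied (bx + dx, bby + dy)) occupied) occupied
      | _, _ => occupied)
      (banners.foldl (fun occupied b =>
        match pvGetA b "x", pvGetA b "y" with
        | some bx, some bby => PySem.Set.add occupied (bx, bby)
        | _, _ => occupied) PySem.Set.empty)) ↔
    t ∈ pvPairs banners ∨ t ∈ pvZones (pvPairs bear_traps) := by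
  rw [pv_mem_foldl_step _ _
    (fun bear t => ∃ bx bby, pvGetA bear "x" = some bx ∧ pvGetA bear "y" = some bby ∧
      ∃ dx ∈ ([-1, 0, 1] : List Int), ∃ dy ∈ ([-1, 0, 1] : List Int), t = (bx + dx, bby + dy))
    (by
      intro s bear k
      cases hx : pvGetA bear "x" <;> cases hy : pvGetA bear "y" <;>
        simp [List.foldl, PySem.Set.mem_add, hx, hy] <;> tauto)]
  rw [pv_mem_foldl_step _ _
    (fun b t => ∃ bx bby, pvGetA b "x" = some bx ∧ pvGetA b "y" = some bby ∧ t = (bx, bby))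
    (by
      intro s b k
      cases hx : pvGetA b "x" <;> cases hy : pvGetA b "y" <;>
        simp [PySem.Set.mem_add, hx, hy])]
  simp only [PySem.Set.empty, List.not_mem_nil, false_or]
  constructor
  · rintro (⟨b, hb, bx, bby, hgx, hgy, rfl⟩ | ⟨bear, hbear, bx, bby, hgx, hgy, dx, hdx, dy, hdy, rfl⟩)
    · exact Or.inl (by
        simp only [pvPairs, List.mem_filterMap]
        exact ⟨b, hb, by simp [hgx, hgy]⟩)
    · refine Or.inr ?_
      simp only [pvZones, List.mem_flatMap]
      refine ⟨(bx, bby), ?_, ?_⟩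
      · simp only [pvPairs, List.mem_filterMap]
        exact ⟨bear, hbear, by simp [hgx, hgy]⟩
      · simp only [List.mem_map]
        exact ⟨dx, hdx, dy, hdy, rfl⟩
  · rintro (h | h)
    · simp only [pvPairs, List.mem_filterMap, Option.bind_eq_some_iff, Option.map_eq_some_iff] at h
      obtain ⟨b, hb, bx, hgx, bby, hgy, rfl⟩ := h
      exact Or.inl ⟨b, hb, bx, bby, hgx, hgy, rfl⟩
    · simp only [pvZones, List.mem_flatMap, List.mem_map] at h
      obtain ⟨c, hc, dx, hdx, dy, hdy, rfl⟩ := h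
      simp only [pvPairs, List.mem_filterMap, Option.bind_eq_some_iff, Option.map_eq_some_iff] at hc
      obtain ⟨bear, hbear, bx, hgx, bby, hgy, rfl⟩ := hc
      exact Or.inr ⟨bear, hbear, bx, bby, hgx, hgy, dx, hdx, dy, hdy, rfl⟩

-- membership after B's 3x3 inner loops
lemma pv_mem_bear_inner (n bx bby : Int) (s : PySem.Set Int) (k : Int) :
    (k ∈ ([-1, 0, 1] : List Int).foldl (fun blocked dx =>
        ([-1, 0, 1] : List Int).foldl (fun blocked dy =>
          let x := bx + dx
          let y := bby + dy
          if 0 ≤ x ∧ x < n ∧ 0 ≤ y ∧ y < n then PySem.Set.add blocked (x * n + y)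
          else blocked) blocked) s) ↔
    k ∈ s ∨ ∃ dx ∈ ([-1, 0, 1] : List Int), ∃ dy ∈ ([-1, 0, 1] : List Int),
      pvInR n (bx + dx, bby + dy) ∧ k = (bx + dx) * n + (bby + dy) := by
  exact pv_mem_foldl_step _ _
    (fun dx k => ∃ dy ∈ ([-1, 0, 1] : List Int),
      pvInR n (bx + dx, bby + dy) ∧ k = (bx + dx) * n + (bby + dy))
    (fun s dx k =>
      pv_mem_foldl_step _ _
        (fun dy k => pvInR n (bx + dx, bby + dy) ∧ k = (bx + dx) * n + (bby + dy))
        (fun s dy k => pv_mem_ite_add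
          (0 ≤ bx + dx ∧ bx + dx < n ∧ 0 ≤ bby + dy ∧ bby + dy < n) s _ k) s k) s k

-- membership in B's blocked index set
lemma pv_mem_blockedB (n : Int) (banners bear_traps : List (List (String × Int))) (k : Int) :
    (k ∈ bear_traps.foldl (fun blocked bear =>
      match pvGetB bear "x" with
      | some bx =>
        match pvGetB bear "y" with
        | some bby =>
            ([-1, 0, 1] : List Int).foldl (fun blocked dx =>
              ([-1, 0, 1] : List Int).foldl (fun blocked dy =>
                let x := bx + dx
                let y := bby + dy
                if 0 ≤ x ∧ x < n ∧ 0 ≤ y ∧ y < n then PySem.Set.add blocked (x * n + y)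
                else blocked) blocked) blocked
        | none => blocked
      | none => blocked)
      (banners.foldl (fun blocked b =>
        match pvGetB b "x" with
        | some bx =>
          match pvGetB b "y" with
          | some bby =>
              if 0 ≤ bx ∧ bx < n ∧ 0 ≤ bby ∧ bby < n then PySem.Set.add blocked (bx * n + bby)
              else blocked
          | none => blocked
        | none => blocked) PySem.Set.empty)) ↔
    (∃ c ∈ pvPairs banners, pvInR n c ∧ k = c.1 * n + c.2) ∨
    (∃ c ∈ pvZones (pvPairs bear_traps), pvInR n c ∧ k = c.1 * n + c.2) := by
  rw [pv_mem_foldl_step _ _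
    (fun bear k => ∃ bx bby, pvGetB bear "x" = some bx ∧ pvGetB bear "y" = some bby ∧
      ∃ dx ∈ ([-1, 0, 1] : List Int), ∃ dy ∈ ([-1, 0, 1] : List Int),
        pvInR n (bx + dx, bby + dy) ∧ k = (bx + dx) * n + (bby + dy))
    (by
      intro s bear k
      cases hx : pvGetB bear "x" with
      | none => cases hy : pvGetB bear "y" <;> simp [hx, hy]
      | some bx =>
        cases hy : pvGetB bear "y" with
        | none => simp [hx, hy]
        | some bby =>
          simp only [hx, hy]
          rw [pv_mem_bear_inner n bx bby s k]
          simp)]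
  rw [pv_mem_foldl_step _ _
    (fun b k => ∃ bx bby, pvGetB b "x" = some bx ∧ pvGetB b "y" = some bby ∧
      pvInR n (bx, bby) ∧ k = bx * n + bby)
    (by
      intro s b k
      cases hx : pvGetB b "x" <;> cases hy : pvGetB b "y" <;>
        simp [pv_mem_ite_add, pvInR, hx, hy])]
  simp only [PySem.Set.empty, List.not_mem_nil, false_or]
  have hBA : pvGetB = pvGetA := rfl
  rw [hBA]
  constructor
  · rintro (⟨b, hb, bx, bby, hgx, hgy, hr, rfl⟩ |
      ⟨bear, hbear, bx, bby, hgx, hgy, dx, hdx, dy, hdy, hr, rfl⟩)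
    · refine Or.inl ⟨(bx, bby), ?_, hr, rfl⟩
      simp only [pvPairs, List.mem_filterMap]
      exact ⟨b, hb, by simp [hgx, hgy]⟩
    · refine Or.inr ⟨(bx + dx, bby + dy), ?_, hr, rfl⟩
      simp only [pvZones, List.mem_flatMap, List.mem_map]
      refine ⟨(bx, bby), ?_, dx, hdx, dy, hdy, rfl⟩
      simp only [pvPairs, List.mem_filterMap]
      exact ⟨bear, hbear, by simp [hgx, hgy]⟩
  · rintro (⟨c, hc, hr, rfl⟩ | ⟨c, hc, hr, rfl⟩)
    · simp only [pvPairs, List.mem_filterMap, Option.bind_eq_some_iff, Option.map_eq_some_iff] at hc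
      obtain ⟨b, hb, bx, hgx, bby, hgy, rfl⟩ := hc
      exact Or.inl ⟨b, hb, bx, bby, hgx, hgy, hr, rfl⟩
    · simp only [pvZones, List.mem_flatMap, List.mem_map] at hc
      obtain ⟨c0, hc0, dx, hdx, dy, hdy, rfl⟩ := hc
      simp only [pvPairs, List.mem_filterMap, Option.bind_eq_some_iff, Option.map_eq_some_iff] at hc0
      obtain ⟨bear, hbear, bx, hgx, bby, hgy, rfl⟩ := hc0
      exact Or.inr ⟨bear, hbear, bx, bby, hgx, hgy, dx, hdx, dy, hdy, hr, rfl⟩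

-- div/mod image membership vs linearized membership
lemma pv_key (n k : Int) (hn : 0 < n) (hk0 : 0 ≤ k) (hk1 : k < n * n) (l : List (Int × Int)) :
    ((PySem.Int.floordiv k n, PySem.Int.mod k n) ∈ l) ↔
    ∃ c ∈ l, pvInR n c ∧ k = c.1 * n + c.2 := by
  constructor
  · intro h
    obtain ⟨h1, h2, h3, h4⟩ := pv_divmod_bounds n k hn hk0 hk1
    refine ⟨_, h, ⟨h1, h2, h3, h4⟩, ?_⟩
    have := PySem.Int.floordiv_mul_add_mod k n
    dsimp only
    omega
  · rintro ⟨⟨x, y⟩, hc, ⟨h1, h2, h3, h4⟩, rfl⟩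
    have h := pv_lin_inv n x y hn h3 h4
    rw [h.1, h.2]
    exact hc

-- A's grid scan is a filter of the row-major tile list
lemma pv_scanA (n : Int) (occ : PySem.Set (Int × Int)) :
    ((PySem.List.pyRange 0 n 1).foldl (fun walkable x =>
      (PySem.List.pyRange 0 n 1).foldl (fun walkable y =>
        if !(PySem.Set.contains occ (x, y)) then walkable ++ [(x, y)] else walkable)
        walkable) [])
    = ((PySem.List.pyRange 0 n 1).flatMap (fun x =>
        (PySem.List.pyRange 0 n 1).map (fun y => (x, y)))).filter
          (fun t => !PySem.Set.contains occ t) := by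
  have hstep : (fun (walkable : List (Int × Int)) (x : Int) =>
      (PySem.List.pyRange 0 n 1).foldl (fun walkable y =>
        if !(PySem.Set.contains occ (x, y)) then walkable ++ [(x, y)] else walkable) walkable)
      = fun walkable x => walkable ++
        ((PySem.List.pyRange 0 n 1).filter (fun y => !PySem.Set.contains occ (x, y))).map
          (fun y => (x, y)) := by
    funext walkable x
    exact PySem.List.foldl_append_if _ _ _ _
  rw [hstep, PySem.List.foldl_append_eq_flatMap, List.nil_append, List.filter_flatMap]
  have hfun : (fun (x : Int) => ((PySem.List.pyRange 0 n 1).filter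
        (fun y => !PySem.Set.contains occ (x, y))).map (fun y => (x, y)))
      = fun x => ((PySem.List.pyRange 0 n 1).map (fun y => (x, y))).filter
        (fun t => !PySem.Set.contains occ t) := by
    funext x
    rw [List.filter_map]
    rfl
  rw [hfun]

lemma pv_main (grid_size : Int) (banners bear_traps : List (List (String × Int))) :
    get_walkable_tiles grid_size banners bear_traps
      = get_walkable_tiles_alt grid_size banners bear_traps := by
  by_cases hle : grid_size ≤ 0
  · simp only [get_walkable_tiles, get_walkable_tiles_alt, if_pos hle]
    rw [PySem.List.pyRange_one_eq_nil hle]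
    rfl
  · have hn : 0 < grid_size := by omega
    simp only [get_walkable_tiles, get_walkable_tiles_alt, if_neg hle]
    rw [pv_scanA]
    have hrow : (PySem.List.pyRange 0 grid_size 1).flatMap (fun x =>
        (PySem.List.pyRange 0 grid_size 1).map (fun y => (x, y)))
        = (PySem.List.pyRange 0 (grid_size * grid_size) 1).map
            (fun k => (PySem.Int.floordiv k grid_size, PySem.Int.mod k grid_size)) := by
      have h := pv_rowmajor grid_size hn grid_size.toNat
      rwa [show ((grid_size.toNat : Nat) : Int) = grid_size by omega] at h
    rw [hrow, List.filter_map]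
    -- Nodup of B's blocked set
    have hnodup : (bear_traps.foldl (fun blocked bear =>
        match pvGetB bear "x" with
        | some bx =>
          match pvGetB bear "y" with
          | some bby =>
              ([-1, 0, 1] : List Int).foldl (fun blocked dx =>
                ([-1, 0, 1] : List Int).foldl (fun blocked dy =>
                  let x := bx + dx
                  let y := bby + dy
                  if 0 ≤ x ∧ x < grid_size ∧ 0 ≤ y ∧ y < grid_size then
                    PySem.Set.add blocked (x * grid_size + y)
                  else blocked) blocked) blocked
          | none => blocked
        | none => blocked)
        (banners.foldl (fun blocked b =>
          match pvGetB b "x" with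
          | some bx =>
            match pvGetB b "y" with
            | some bby =>
                if 0 ≤ bx ∧ bx < grid_size ∧ 0 ≤ bby ∧ bby < grid_size then
                  PySem.Set.add blocked (bx * grid_size + bby)
                else blocked
            | none => blocked
          | none => blocked) PySem.Set.empty)).Nodup := by
      refine pv_nodup_foldl _ _ ?_ _ (pv_nodup_foldl _ _ ?_ _ List.nodup_nil)
      · intro s bear hs
        cases hx : pvGetB bear "x" <;> cases hy : pvGetB bear "y" <;>
          simp only <;> try exact hs
        refine pv_nodup_foldl _ _ ?_ _ hs
        intro s' dx hs'
        refine pv_nodup_foldl _ _ ?_ _ hs'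
        intro s'' dy hs''
        dsimp only
        split_ifs with h
        · exact PySem.Set.nodup_add _ _ hs''
        · exact hs''
      · intro s b hs
        cases hx : pvGetB b "x" <;> cases hy : pvGetB b "y" <;>
          simp only <;> try exact hs
        split_ifs with h
        · exact PySem.Set.nodup_add _ _ hs
        · exact hs
    set blocked := (bear_traps.foldl (fun blocked bear =>
        match pvGetB bear "x" with
        | some bx =>
          match pvGetB bear "y" with
          | some bby =>
              ([-1, 0, 1] : List Int).foldl (fun blocked dx =>
                ([-1, 0, 1] : List Int).foldl (fun blocked dy =>
                  let x := bx + dx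
                  let y := bby + dy
                  if 0 ≤ x ∧ x < grid_size ∧ 0 ≤ y ∧ y < grid_size then
                    PySem.Set.add blocked (x * grid_size + y)
                  else blocked) blocked) blocked
          | none => blocked
        | none => blocked)
        (banners.foldl (fun blocked b =>
          match pvGetB b "x" with
          | some bx =>
            match pvGetB b "y" with
            | some bby =>
                if 0 ≤ bx ∧ bx < grid_size ∧ 0 ≤ bby ∧ bby < grid_size then
                  PySem.Set.add blocked (bx * grid_size + bby)
                else blocked
            | none => blocked
          | none => blocked) PySem.Set.empty)) with hblocked
    set bs := PySem.List.sorted blocked (fun i => i) false with hbs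
    have hmemb : ∀ k : Int, k ∈ bs ↔
        (∃ c ∈ pvPairs banners, pvInR grid_size c ∧ k = c.1 * grid_size + c.2) ∨
        (∃ c ∈ pvZones (pvPairs bear_traps), pvInR grid_size c ∧ k = c.1 * grid_size + c.2) := by
      intro k
      rw [hbs, PySem.List.mem_sorted, hblocked, pv_mem_blockedB]
    have hsorted : bs.Pairwise (· < ·) := by
      have hle2 : bs.Pairwise (fun a b => a ≤ b) :=
        PySem.List.sorted_pairwise blocked (fun i => i)
      have hnd : bs.Nodup :=
        ((PySem.List.sorted_perm blocked (fun i => i) false).nodup_iff).mpr hnodup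
      exact (hle2.and hnd).imp (fun h => lt_of_le_of_ne h.1 h.2)
    have hbounds : ∀ i ∈ bs, -1 < i ∧ i < grid_size * grid_size := by
      intro i hi
      rw [hmemb] at hi
      rcases hi with ⟨⟨x, y⟩, _, ⟨h1, h2, h3, h4⟩, rfl⟩ | ⟨⟨x, y⟩, _, ⟨h1, h2, h3, h4⟩, rfl⟩ <;>
        · have := pv_lin_bounds grid_size x y hn h1 h2 h3 h4
          dsimp only at this ⊢
          omega
    rw [pv_gap (grid_size * grid_size)
      (fun k => (PySem.Int.floordiv k grid_size, PySem.Int.mod k grid_size)) bs [] (-1)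
      hsorted hbounds]
    rw [show (-1 : Int) + 1 = 0 by norm_num, List.nil_append]
    congr 1
    refine List.filter_congr (fun k hk => ?_)
    rw [PySem.List.mem_pyRange_one] at hk
    have hmem : ((PySem.Int.floordiv k grid_size, PySem.Int.mod k grid_size) ∈
        bear_traps.foldl (fun occupied bear =>
          match pvGetA bear "x", pvGetA bear "y" with
          | some bx, some bby =>
              ([-1, 0, 1] : List Int).foldl (fun occupied dx =>
                ([-1, 0, 1] : List Int).foldl (fun occupied dy =>
                  PySem.Set.add occupied (bx + dx, bby + dy)) occupied) occupied
          | _, _ => occupied)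
          (banners.foldl (fun occupied b =>
            match pvGetA b "x", pvGetA b "y" with
            | some bx, some bby => PySem.Set.add occupied (bx, bby)
            | _, _ => occupied) PySem.Set.empty)) ↔ k ∈ bs := by
      rw [pv_mem_occA, hmemb k,
        pv_key grid_size k hn hk.1 hk.2 (pvPairs banners),
        pv_key grid_size k hn hk.1 hk.2 (pvZones (pvPairs bear_traps))]
    simp only [Function.comp]
    have hcont : PySem.Set.contains (bear_traps.foldl (fun occupied bear =>
          match pvGetA bear "x", pvGetA bear "y" with
          | some bx, some bby =>
              ([-1, 0, 1] : List Int).foldl (fun occupied dx =>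
                ([-1, 0, 1] : List Int).foldl (fun occupied dy =>
                  PySem.Set.add occupied (bx + dx, bby + dy)) occupied) occupied
          | _, _ => occupied)
          (banners.foldl (fun occupied b =>
            match pvGetA b "x", pvGetA b "y" with
            | some bx, some bby => PySem.Set.add occupied (bx, bby)
            | _, _ => occupied) PySem.Set.empty))
        (PySem.Int.floordiv k grid_size, PySem.Int.mod k grid_size) = decide (k ∈ bs) := by
      by_cases h : k ∈ bs
      · rw [(PySem.Set.contains_iff _ _).mpr (hmem.mpr h)]
        simp [h]
      · have h2 : ¬ _ := fun hc => h (hmem.mp ((PySem.Set.contains_iff _ _).mp hc))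
        rw [Bool.eq_false_iff.mpr h2]
        simp [h]
    rw [hcont]

-- ===== VERDICT (by name: the statement is the Claim_ definition above) =====
theorem get_walkable_tiles_spec : Claim_equal_get_walkable_tiles := by
  intro grid_size banners bear_traps _
  exact pv_main grid_size banners bear_traps
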